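-- pv_equiv track=rewrite | github.com/kooroosh1363/PYTHON-DATA_SCIENCE-MACHINE_LEARNUNG | filoger_data_science_science_exercise/1-filoger-task-1/0-filoger-task-1.py | counts_char
-- ===== SOURCE A (Python) =====
-- def counts_char(txt):
--     # Returns a dict of chars from txt.
--     chars = {}
--     for char in txt:
--         if char != ' ':
--             # Returns a chars dict.
--             if char in chars:
--                 chars[char] += 1
--             else:
--                 chars[char] = 1
--     return chars
-- ===== SOURCE B (Python) =====
-- def counts_char(txt):
--     # One dict comprehension over the distinct characters (first-occurrence
--     # order), counting each with str.count, instead of an incrementing pass.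
--     return {char: txt.count(char) for char in dict.fromkeys(txt) if char != ' '}
-- ===== Notes on version B (the rewrite author's own statement) =====
-- stated objective: idiomatic
-- what changed: Replaces the incrementing per-character dict loop by a dict comprehension over the distinct characters (dict.fromkeys) that counts each non-space character with str.count.
import Mathlib
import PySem

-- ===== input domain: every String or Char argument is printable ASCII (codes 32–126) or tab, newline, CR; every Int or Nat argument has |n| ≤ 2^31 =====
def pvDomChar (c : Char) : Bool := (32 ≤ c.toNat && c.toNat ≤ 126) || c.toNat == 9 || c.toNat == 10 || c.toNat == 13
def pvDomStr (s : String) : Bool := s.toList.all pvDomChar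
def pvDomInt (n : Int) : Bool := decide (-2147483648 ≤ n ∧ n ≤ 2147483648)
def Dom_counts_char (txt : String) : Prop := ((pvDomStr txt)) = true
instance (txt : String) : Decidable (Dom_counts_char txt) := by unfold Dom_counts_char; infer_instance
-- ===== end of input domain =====

-- B replaces A's incrementing dict loop by a dict comprehension over the distinct
-- characters (dict.fromkeys order) counting each non-space char with str.count (idiomatic).

-- ===== PORT A =====
-- Python dict keys are one-character STRINGS, hence the `String.ofList [char]` key.
def counts_char (txt : String) : List (String × Int) :=
  (txt.toList.foldl
    (fun (chars : PySem.Dict String Int) char =>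
      if char != ' ' then
        (if chars.contains (String.ofList [char]) then
          -- chars[char] += 1
          chars.modify (String.ofList [char]) 0 (· + 1)
        else
          chars.insert (String.ofList [char]) 1)
      else chars)
    PySem.Dict.empty).items

-- ===== PORT B =====
-- The dict comprehension iterates dict.fromkeys(txt) (= PySem.List.dedup), whose keys are
-- distinct, so the resulting dict's items are exactly this filtered map.
def counts_char_alt (txt : String) : List (String × Int) :=
  ((PySem.List.dedup txt.toList).filter (fun char => char != ' ')).map
    (fun char => (String.ofList [char], (PySem.Str.count txt (String.ofList [char]) : Int)))

-- ===== PRECONDITION & SPEC =====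
def Spec_counts_char (txt : String) (out : List (String × Int)) : Prop := out = counts_char_alt txt
instance (txt : String) (out : List (String × Int)) : Decidable (Spec_counts_char txt out) := by unfold Spec_counts_char; infer_instance

-- ===== CLAIM (what is proved, stated in full; the proofs are below) =====
def Claim_equal_counts_char : Prop := ∀ (txt : String), Dom_counts_char txt → Spec_counts_char txt (counts_char txt)

-- ===== LEMMAS AND PROOFS =====

-- str.count with a single-character needle is List.count.
theorem chars_count_go_single (c : Char) :
    ∀ (fuel : Nat) (l : List Char) (acc : Nat), l.length ≤ fuel →
      PySem.Chars.count.go [c] fuel l acc = acc + l.count c := by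
  intro fuel
  induction fuel with
  | zero =>
    intro l acc h
    cases l with
    | nil => simp [PySem.Chars.count.go]
    | cons x t => simp at h
  | succ n ih =>
    intro l acc h
    cases l with
    | nil => simp [PySem.Chars.count.go]
    | cons x t =>
      by_cases hx : x = c
      · subst hx
        have hpre : List.isPrefixOf [x] (x :: t) = true := by simp [List.isPrefixOf]
        simp only [PySem.Chars.count.go, hpre, if_true, List.length_nil, List.length_cons,
          List.drop_succ_cons, List.drop_zero]
        rw [ih t (acc + 1) (by simpa using Nat.le_of_succ_le_succ h)]
        simp
        omega
      · have hpre : List.isPrefixOf [c] (x :: t) = false := by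
          simp [List.isPrefixOf]
          exact fun hcx => absurd hcx.symm hx
        simp only [PySem.Chars.count.go, hpre]
        rw [ih t acc (by simpa using Nat.le_of_succ_le_succ h)]
        simp [hx]

theorem chars_count_single (l : List Char) (c : Char) :
    PySem.Chars.count l [c] = l.count c := by
  simp only [PySem.Chars.count, List.isEmpty_cons, if_false, Bool.false_eq_true]
  have := chars_count_go_single c l.length l 0 (le_refl _)
  omega

-- Set.ofList commutes with filter.
theorem ofList_filter {α : Type} [BEq α] [LawfulBEq α] (p : α → Bool) (l : List α) :
    ∀ (s : PySem.Set α),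
      List.foldl PySem.Set.add (List.filter p s) (List.filter p l) =
        List.filter p (List.foldl PySem.Set.add s l) := by
  induction l with
  | nil => intro s; simp
  | cons x t ih =>
    intro s
    by_cases hp : p x = true
    · have hadd : List.filter p (PySem.Set.add s x) = PySem.Set.add (List.filter p s) x := by
        simp only [PySem.Set.add, PySem.Set.contains]
        by_cases hm : x ∈ s
        · simp [hm, List.mem_filter, hp]
        · simp [hm, List.mem_filter, List.filter_append, hp]
      simp only [List.filter_cons, hp, if_true, List.foldl_cons]
      rw [← hadd]
      exact ih (PySem.Set.add s x)
    · have hadd : List.filter p (PySem.Set.add s x) = List.filter p s := by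
        simp only [PySem.Set.add, PySem.Set.contains]
        by_cases hm : x ∈ s
        · simp [hm]
        · simp [hm, List.filter_append, hp]
      simp only [List.filter_cons, hp, List.foldl_cons]
      rw [← hadd]
      exact ih (PySem.Set.add s x)
  
-- Set.ofList commutes with mapping an injective function.
theorem ofList_map_inj {α β : Type} [BEq α] [LawfulBEq α] [BEq β] [LawfulBEq β]
    (f : α → β) (hf : Function.Injective f) (l : List α) :
    ∀ (s : PySem.Set α),
      List.foldl PySem.Set.add (s.map f) (l.map f) =
        (List.foldl PySem.Set.add s l).map f := by
  induction l with
  | nil => intro s; simp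
  | cons x t ih =>
    intro s
    have hadd : (PySem.Set.add s x).map f = PySem.Set.add (s.map f) (f x) := by
      simp only [PySem.Set.add, PySem.Set.contains]
      by_cases hm : x ∈ s
      · simp [hm, List.mem_map]
        exact ⟨x, hm, rfl⟩
      · have : ¬ f x ∈ s.map f := by
          simp only [List.mem_map, not_exists]
          rintro a ⟨ha, hfa⟩
          exact hm (hf hfa ▸ ha)
        simp [hm, this]
    simp only [List.map_cons, List.foldl_cons]
    rw [← hadd]
    exact ih (PySem.Set.add s x)

theorem key_injective : Function.Injective (fun c : Char => String.ofList [c]) := by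
  intro a b h
  have := congrArg String.toList h
  simpa using this

-- ===== VERDICT (by name: the statement is the Claim_ definition above) =====
theorem counts_char_spec : Claim_equal_counts_char := by
  intro txt _
  unfold Spec_counts_char counts_char counts_char_alt
  -- A's loop body is an unconditional counter update on the filtered characters
  have hstep : ∀ (d : PySem.Dict String Int) (c : Char),
      (if c != ' ' then
        (if d.contains (String.ofList [c]) then
          d.modify (String.ofList [c]) 0 (· + 1)
        else d.insert (String.ofList [c]) 1)
      else d)
      = (if c != ' ' then d.modify (String.ofList [c]) 0 (· + 1) else d) := by
    intro d c
    by_cases hc : (c != ' ') = true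
    · simp only [hc, if_true]
      by_cases hcon : d.contains (String.ofList [c]) = true
      · simp [hcon]
      · have h0 : d.getD (String.ofList [c]) 0 = 0 :=
          PySem.Dict.getD_of_not_contains d 0 (by simpa using hcon)
        have hm : d.modify (String.ofList [c]) 0 (· + 1)
            = d.insert (String.ofList [c]) (d.getD (String.ofList [c]) 0 + 1) := rfl
        simp [hcon, hm, h0]
    · simp [hc]
  rw [PySem.List.foldl_congr_mem txt.toList _
        (fun (d : PySem.Dict String Int) c =>
          if c != ' ' then d.modify (String.ofList [c]) 0 (· + 1) else d)
        PySem.Dict.empty (fun d c _ => hstep d c)]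
  rw [PySem.List.foldl_if_eq_foldl_filter (fun c => c != ' ')
        (fun (d : PySem.Dict String Int) c => d.modify (String.ofList [c]) 0 (· + 1))]
  set F : List Char := txt.toList.filter (fun c => c != ' ') with hF
  have hfold : F.foldl (fun (d : PySem.Dict String Int) c => d.modify (String.ofList [c]) 0 (· + 1))
      PySem.Dict.empty = PySem.Dict.counter (F.map (fun c => String.ofList [c])) := by
    rw [PySem.Dict.counter_eq_foldl, List.foldl_map]
  rw [hfold, PySem.Dict.items_counter]
  -- left side: keys in first-occurrence order of the filtered string
  have hset : PySem.Set.ofList (F.map (fun c => String.ofList [c]))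
      = (PySem.Set.ofList F).map (fun c => String.ofList [c]) := by
    rw [PySem.Set.ofList_eq_foldl, PySem.Set.ofList_eq_foldl]
    simpa using ofList_map_inj (fun c => String.ofList [c]) key_injective F ([] : PySem.Set Char)
  rw [hset, List.map_map]
  -- right side: dedup then filter = filter then dedup
  have hdf : (PySem.List.dedup txt.toList).filter (fun c => c != ' ') = PySem.Set.ofList F := by
    rw [PySem.List.dedup_eq_ofList, PySem.Set.ofList_eq_foldl, PySem.Set.ofList_eq_foldl, hF]
    simpa using (ofList_filter (fun c => c != ' ') txt.toList ([] : PySem.Set Char)).symm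
  rw [hdf]
  -- pointwise: counts agree on every character of the filtered string
  apply List.map_congr_left
  intro c hc
  have hcF : c ∈ List.filter (fun c => c != ' ') txt.toList := by
    rw [← hF]; exact (PySem.Set.mem_ofList (xs := F) (y := c)).mp hc
  have hcne : (c != ' ') = true := (List.mem_filter.mp hcF).2
  show (String.ofList [c], ((List.map (fun c => String.ofList [c]) F).count (String.ofList [c]) : Int)) = _
  congr 1
  rw [List.count_map_of_injective F (fun c => String.ofList [c]) key_injective c]
  have hcount : F.count c = txt.toList.count c := by
    rw [hF]; exact List.count_filter hcne
  have hstr : PySem.Str.count txt (String.ofList [c]) = txt.toList.count c := by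
    have h1 : PySem.Str.count txt (String.ofList [c]) = PySem.Chars.count txt.toList [c] := by
      simp [PySem.Str.count]
    rw [h1, chars_count_single]
  rw [hcount, hstr]
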